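-- pv_equiv track=rewrite | github.com/sakshambedi/Chevrolet-Website-Scraper-QA-Agent | scrapper/chevy_scrapper.py | _merge_consecutive_headings
-- ===== SOURCE A (Python) =====
-- def _merge_consecutive_headings(tokens):
--     merged = []
--     pending = None
--     for t in tokens:
--         if t.get("type") == "heading":
--             if pending is None:
--                 pending = dict(t)
--             else:
--                 if pending.get("level") == t.get("level"):
--                     ptxt = (pending.get("text") or "").strip()
--                     ttxt = (t.get("text") or "").strip()
--                     pending["text"] = (ptxt + " " + ttxt).strip()
--                 else:
--                     merged.append(pending)
--                     pending = dict(t)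
--         else:
--             if pending is not None:
--                 merged.append(pending)
--                 pending = None
--             merged.append(t)
--     if pending is not None:
--         merged.append(pending)
--     return merged
-- ===== SOURCE B (Python) =====
-- def _merge_consecutive_headings(tokens):
--     out = []
--     i, n = 0, len(tokens)
--     while i < n:
--         t = tokens[i]
--         if t.get("type") != "heading":
--             out.append(t)
--             i += 1
--             continue
--         lvl = t.get("level")
--         j = i + 1
--         while j < n and tokens[j].get("type") == "heading" and tokens[j].get("level") == lvl:
--             j += 1
--         merged = dict(t)
--         if j - i > 1:
--             pieces = ((tok.get("text") or "").strip() for tok in tokens[i:j])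
--             merged["text"] = " ".join(p for p in pieces if p)
--         out.append(merged)
--         i = j
--     return out
-- ===== Notes on version B (the rewrite author's own statement) =====
-- stated objective: alternative
-- what changed: A's single pass with a pending-heading accumulator and in-place text re-stripping is replaced by a partition-into-maximal-runs pass: B scans each maximal run of consecutive same-level headings, emits the first token unchanged for singleton runs, and for longer runs builds the merged text once as ' '.join of the stripped non-empty texts of the whole run.
import Mathlib
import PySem

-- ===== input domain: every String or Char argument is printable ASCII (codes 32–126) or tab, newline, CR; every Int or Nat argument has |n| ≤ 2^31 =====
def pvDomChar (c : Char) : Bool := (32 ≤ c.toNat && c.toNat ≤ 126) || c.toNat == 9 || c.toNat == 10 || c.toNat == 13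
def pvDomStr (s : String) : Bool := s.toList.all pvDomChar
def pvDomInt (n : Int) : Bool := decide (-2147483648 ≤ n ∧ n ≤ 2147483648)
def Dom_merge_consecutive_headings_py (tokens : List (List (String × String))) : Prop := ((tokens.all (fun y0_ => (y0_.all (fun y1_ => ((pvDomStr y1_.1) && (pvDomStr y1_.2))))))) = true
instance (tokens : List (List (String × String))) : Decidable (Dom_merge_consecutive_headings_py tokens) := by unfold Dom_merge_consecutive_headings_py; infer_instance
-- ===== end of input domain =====

-- B replaces A's pending-accumulator state machine by a partition-into-runs pass
-- (objective: alternative decomposition, same cost); return values proved equal.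

abbrev pvTok : Type := PySem.Dict String String

-- ===== PORT A =====
-- the three merge lines of A: pending["text"] = (ptxt + " " + ttxt).strip()
-- (a + " " + b is ported as " ".join([a, b]), exact for Python str +)
def pvMergeStep (p t : pvTok) : pvTok :=
  p.insert "text" (PySem.Str.strip (PySem.Str.join " "
    [PySem.Str.strip (p.getD "text" ""), PySem.Str.strip (t.getD "text" "")]))

-- one iteration of A's for-loop, state = (merged, pending)
def pvAStep (st : List pvTok × Option pvTok) (t : pvTok) : List pvTok × Option pvTok :=
  if t.get? "type" == some "heading" then
    match st.2 with
    | none => (st.1, some t)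
    | some p =>
      if p.get? "level" == t.get? "level" then (st.1, some (pvMergeStep p t))
      else (st.1 ++ [p], some t)
  else
    match st.2 with
    | none => (st.1 ++ [t], none)
    | some p => (st.1 ++ [p] ++ [t], none)

def merge_consecutive_headings_py (tokens : List (List (String × String))) : List (List (String × String)) :=
  let final := (tokens.map (fun t => PySem.Dict.ofList t)).foldl pvAStep ([], none)
  (match final.2 with
   | some p => final.1 ++ [p]
   | none => final.1).map (fun d => PySem.Dict.items d)

-- ===== PORT B =====
def pvIsHead (t : pvTok) : Bool := t.get? "type" == some "heading"

def pvSameRun (lvl : Option String) (u : pvTok) : Bool := pvIsHead u && (u.get? "level" == lvl)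

-- Source B: merged = dict(t); if the run has more tokens, set text to the join of
-- the stripped non-empty texts of the whole run
def pvEmit (t : pvTok) (run : List pvTok) : pvTok :=
  if run.isEmpty then t
  else t.insert "text" (PySem.Str.join " "
    (((t :: run).map (fun u => PySem.Str.strip (u.getD "text" ""))).filter (fun p => !(p == ""))))

-- Source B's outer while-loop: peel one token (or one maximal heading run) at a time
def pvBGo : List pvTok → List pvTok
  | [] => []
  | t :: rest =>
    if pvIsHead t then
      pvEmit t (rest.takeWhile (pvSameRun (t.get? "level")))
        :: pvBGo (rest.dropWhile (pvSameRun (t.get? "level")))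
    else t :: pvBGo rest
  termination_by l => l.length
  decreasing_by
  · exact Nat.lt_succ_of_le (List.length_dropWhile_le _ _)
  · simp

def merge_consecutive_headings_py_alt (tokens : List (List (String × String))) : List (List (String × String)) :=
  (pvBGo (tokens.map (fun t => PySem.Dict.ofList t))).map (fun d => PySem.Dict.items d)

-- ===== PRECONDITION & SPEC =====
def Spec_merge_consecutive_headings_py (tokens : List (List (String × String))) (out : List (List (String × String))) : Prop := out = merge_consecutive_headings_py_alt tokens
instance (tokens : List (List (String × String))) (out : List (List (String × String))) : Decidable (Spec_merge_consecutive_headings_py tokens out) := by unfold Spec_merge_consecutive_headings_py; infer_instance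

-- ===== CLAIM (what is proved, stated in full; the proofs are below) =====
def Claim_equal_merge_consecutive_headings_py : Prop := ∀ (tokens : List (List (String × String))), Dom_merge_consecutive_headings_py tokens → Spec_merge_consecutive_headings_py tokens (merge_consecutive_headings_py tokens)

-- ===== LEMMAS AND PROOFS =====

def pvClean (cs : List Char) : Prop :=
  (∀ c, cs.head? = some c → PySem.Chars.isspace c = false) ∧
  (∀ c, cs.getLast? = some c → PySem.Chars.isspace c = false)

theorem pv_head_dropWhile (p : Char → Bool) (l : List Char) (c : Char)
    (h : (l.dropWhile p).head? = some c) : p c = false := by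
  induction l with
  | nil => simp at h
  | cons a t ih =>
    rw [List.dropWhile_cons] at h
    split at h
    · exact ih h
    · next hp =>
      simp only [List.head?_cons, Option.some_inj] at h
      rw [← h]
      simpa using hp

theorem pv_dropWhile_eq_self (cs : List Char)
    (h : ∀ c, cs.head? = some c → PySem.Chars.isspace c = false) :
    cs.dropWhile PySem.Chars.isspace = cs := by
  cases cs with
  | nil => rfl
  | cons a l => rw [List.dropWhile_cons, h a rfl]; simp

theorem pv_clean_strip (cs : List Char) : pvClean (PySem.Chars.strip cs) := by
  unfold PySem.Chars.strip PySem.Chars.rstrip PySem.Chars.lstrip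
  set x := cs.dropWhile PySem.Chars.isspace with hx
  set y := x.reverse.dropWhile PySem.Chars.isspace with hy
  constructor
  · intro c hc
    have hpre : y.reverse <+: x := by
      have : y <:+ x.reverse := List.dropWhile_suffix _
      have := List.reverse_prefix.mpr this
      simpa using this
    obtain ⟨t, ht⟩ := hpre
    have hxh : x.head? = some c := by
      rw [← ht, List.head?_append, hc]; rfl
    exact pv_head_dropWhile _ cs c (by rwa [← hx])
  · intro c hc
    rw [List.getLast?_reverse] at hc
    exact pv_head_dropWhile _ x.reverse c (by rwa [← hy])

theorem pv_lstrip_eq_self (cs : List Char)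
    (h : ∀ c, cs.head? = some c → PySem.Chars.isspace c = false) :
    PySem.Chars.lstrip cs = cs := pv_dropWhile_eq_self cs h

theorem pv_rstrip_eq_self (cs : List Char)
    (h : ∀ c, cs.getLast? = some c → PySem.Chars.isspace c = false) :
    PySem.Chars.rstrip cs = cs := by
  unfold PySem.Chars.rstrip
  rw [pv_dropWhile_eq_self cs.reverse (by intro c hc; exact h c (by rwa [List.head?_reverse] at hc))]
  simp

theorem pv_strip_eq_self (cs : List Char) (h : pvClean cs) :
    PySem.Chars.strip cs = cs := by
  unfold PySem.Chars.strip
  rw [pv_lstrip_eq_self cs h.1, pv_rstrip_eq_self cs h.2]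

theorem pv_combine (a b : List Char) (ha : pvClean a) (hb : pvClean b) :
    PySem.Chars.strip (a ++ ' ' :: b) =
      if a.isEmpty then b else if b.isEmpty then a else a ++ ' ' :: b := by
  cases a with
  | nil =>
    simp only [List.nil_append, List.isEmpty_nil, if_true]
    show PySem.Chars.strip (' ' :: b) = b
    unfold PySem.Chars.strip
    rw [show PySem.Chars.lstrip (' ' :: b) = PySem.Chars.lstrip b from by
      simp [PySem.Chars.lstrip, show PySem.Chars.isspace ' ' = true from rfl]]
    rw [pv_lstrip_eq_self b hb.1, pv_rstrip_eq_self b hb.2]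
  | cons a0 a' =>
    have hhead : ∀ c, ((a0 :: a') ++ ' ' :: b).head? = some c → PySem.Chars.isspace c = false := by
      intro c hc
      simp only [List.cons_append, List.head?_cons, Option.some_inj] at hc
      exact ha.1 c (by rw [← hc]; rfl)
    unfold PySem.Chars.strip
    rw [pv_lstrip_eq_self _ hhead]
    cases b with
    | nil =>
      simp only [List.isEmpty_cons, Bool.false_eq_true, if_false, List.isEmpty_nil, if_true]
      unfold PySem.Chars.rstrip
      rw [List.reverse_append]
      simp only [List.reverse_cons, List.reverse_nil, List.nil_append, List.singleton_append]
      rw [List.dropWhile_cons, show PySem.Chars.isspace ' ' = true from rfl]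
      simp only [if_true]
      rw [← List.reverse_cons]
      rw [pv_dropWhile_eq_self (a0 :: a').reverse
        (by intro c hc; exact ha.2 c (by rwa [List.head?_reverse] at hc))]
      simp
    | cons b0 b' =>
      simp only [List.isEmpty_cons, Bool.false_eq_true, if_false]
      apply pv_rstrip_eq_self
      intro c hc
      rw [List.getLast?_append_of_ne_nil _ (by simp), List.getLast?_cons_cons] at hc
      exact hb.2 c hc

def pvJoinSp : List (List Char) → List Char
  | [] => []
  | [p] => p
  | p :: q :: r => p ++ ' ' :: pvJoinSp (q :: r)

theorem pvJoinSp_eq_join (ps : List (List Char)) :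
    PySem.Chars.join [' '] ps = pvJoinSp ps := by
  induction ps with
  | nil => rfl
  | cons p ps ih =>
    cases ps with
    | nil => simp [PySem.Chars.join, List.intercalate, pvJoinSp]
    | cons q r =>
      rw [show pvJoinSp (p :: q :: r) = p ++ ' ' :: pvJoinSp (q :: r) from rfl, ← ih]
      simp [PySem.Chars.join, List.intercalate, List.intersperse]

theorem pvJoinSp_ne_nil (F : List (List Char)) (hne : ∀ p ∈ F, p ≠ []) (h : F ≠ []) :
    pvJoinSp F ≠ [] := by
  cases F with
  | nil => exact absurd rfl h
  | cons p F' =>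
    cases F' with
    | nil => exact hne p (by simp)
    | cons q r =>
      show p ++ ' ' :: pvJoinSp (q :: r) ≠ []
      simp

theorem pvClean_joinSp (F : List (List Char)) (h : ∀ p ∈ F, pvClean p ∧ p ≠ []) :
    pvClean (pvJoinSp F) := by
  induction F with
  | nil => exact ⟨by intro c hc; simp [pvJoinSp] at hc, by intro c hc; simp [pvJoinSp] at hc⟩
  | cons p F' ih =>
    cases F' with
    | nil => exact (h p (by simp)).1
    | cons q r =>
      have hp := h p (by simp)
      have hrest : ∀ x ∈ q :: r, pvClean x ∧ x ≠ [] := by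
        intro x hx; exact h x (by simp [hx])
      have ihc := ih hrest
      have hne : pvJoinSp (q :: r) ≠ [] :=
        pvJoinSp_ne_nil _ (fun x hx => (hrest x hx).2) (by simp)
      constructor
      · intro c hc
        show _
        rw [show pvJoinSp (p :: q :: r) = p ++ ' ' :: pvJoinSp (q :: r) from rfl] at hc
        cases hpc : p with
        | nil => exact absurd hpc hp.2
        | cons p0 p'' =>
          rw [hpc] at hc
          simp only [List.cons_append, List.head?_cons, Option.some_inj] at hc
          exact hp.1.1 c (by rw [hpc, List.head?_cons, hc])
      · intro c hc
        rw [show pvJoinSp (p :: q :: r) = p ++ ' ' :: pvJoinSp (q :: r) from rfl] at hc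
        rw [List.getLast?_append_of_ne_nil _ (by simp)] at hc
        obtain ⟨j0, j', hj⟩ : ∃ j0 j', pvJoinSp (q :: r) = j0 :: j' := by
          cases hj : pvJoinSp (q :: r) with
          | nil => exact absurd hj hne
          | cons j0 j' => exact ⟨j0, j', rfl⟩
        rw [hj, List.getLast?_cons_cons] at hc
        exact ihc.2 c (by rw [hj]; exact hc)

theorem pvJoinSp_append_singleton (F : List (List Char)) (x : List Char) (h : F ≠ []) :
    pvJoinSp (F ++ [x]) = pvJoinSp F ++ ' ' :: x := by
  induction F with
  | nil => exact absurd rfl h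
  | cons p F' ih =>
    cases F' with
    | nil => rfl
    | cons q r =>
      show p ++ ' ' :: pvJoinSp ((q :: r) ++ [x]) = (p ++ ' ' :: pvJoinSp (q :: r)) ++ ' ' :: x
      rw [ih (by simp)]
      simp

def pvPiece (x : List Char) : List (List Char) := if x.isEmpty then [] else [x]

theorem pvPiece_clean (x : List Char) (hx : pvClean x) :
    ∀ p ∈ pvPiece x, pvClean p ∧ p ≠ [] := by
  intro p hp
  unfold pvPiece at hp
  split at hp
  · simp at hp
  · next hx2 =>
    simp only [List.mem_singleton] at hp
    subst hp
    exact ⟨hx, by simpa [List.isEmpty_iff] using hx2⟩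

def pvTxtStep (c t : List Char) : List Char :=
  PySem.Chars.strip (PySem.Chars.join [' '] [PySem.Chars.strip c, PySem.Chars.strip t])

theorem pvTxtStep_joinSp (x t : List Char) (hx : pvClean x) :
    pvTxtStep x t = pvJoinSp (pvPiece x ++ pvPiece (PySem.Chars.strip t)) := by
  unfold pvTxtStep
  rw [pvJoinSp_eq_join]
  rw [show pvJoinSp [PySem.Chars.strip x, PySem.Chars.strip t] =
    PySem.Chars.strip x ++ ' ' :: PySem.Chars.strip t from rfl]
  rw [pv_strip_eq_self x hx]
  rw [pv_combine x (PySem.Chars.strip t) hx (pv_clean_strip t)]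
  unfold pvPiece
  by_cases hxe : x.isEmpty = true
  · by_cases hte : (PySem.Chars.strip t).isEmpty = true
    · rw [if_pos hxe, if_pos hxe, if_pos hte, List.isEmpty_iff.mp hte]; rfl
    · rw [if_pos hxe, if_pos hxe, if_neg hte]; rfl
  · by_cases hte : (PySem.Chars.strip t).isEmpty = true
    · rw [if_neg hxe, if_neg hxe, if_pos hte, if_pos hte, List.append_nil]; rfl
    · rw [if_neg hxe, if_neg hxe, if_neg hte, if_neg hte]; rfl

theorem pvFilter_cons (x : List Char) (l : List (List Char)) :
    (x :: l).filter (fun p => !p.isEmpty) = pvPiece x ++ l.filter (fun p => !p.isEmpty) := by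
  rw [List.filter_cons]; unfold pvPiece
  cases hx : x.isEmpty <;> simp

theorem pvStep_joinSp (F : List (List Char)) (r : List Char)
    (hF : ∀ p ∈ F, pvClean p ∧ p ≠ []) :
    pvTxtStep (pvJoinSp F) r = pvJoinSp (F ++ pvPiece (PySem.Chars.strip r)) := by
  rw [pvTxtStep_joinSp _ r (pvClean_joinSp F hF)]
  by_cases hFe : F = []
  · subst hFe; rfl
  · have hne : pvJoinSp F ≠ [] := pvJoinSp_ne_nil F (fun p hp => (hF p hp).2) hFe
    rw [show pvPiece (pvJoinSp F) = [pvJoinSp F] from by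
      unfold pvPiece; rw [if_neg (by simpa [List.isEmpty_iff] using hne)]]
    by_cases hre : (PySem.Chars.strip r).isEmpty = true
    · rw [show pvPiece (PySem.Chars.strip r) = [] from by unfold pvPiece; rw [if_pos hre]]
      simp [pvJoinSp]
    · rw [show pvPiece (PySem.Chars.strip r) = [PySem.Chars.strip r] from by
        unfold pvPiece; rw [if_neg hre]]
      rw [pvJoinSp_append_singleton F _ hFe]
      rfl

theorem pvKey (rs : List (List Char)) :
    ∀ F, (∀ p ∈ F, pvClean p ∧ p ≠ []) →
    rs.foldl pvTxtStep (pvJoinSp F) =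
      pvJoinSp (F ++ (rs.map PySem.Chars.strip).filter (fun p => !p.isEmpty)) := by
  induction rs with
  | nil => intro F _; simp
  | cons r rs ih =>
    intro F hF
    rw [List.foldl_cons, pvStep_joinSp F r hF]
    rw [ih (F ++ pvPiece (PySem.Chars.strip r)) (by
      intro p hp
      rcases List.mem_append.mp hp with h | h
      · exact hF p h
      · exact pvPiece_clean _ (pv_clean_strip r) p h)]
    rw [List.map_cons, pvFilter_cons, List.append_assoc]

theorem pvFoldTxt (t0 : List Char) (rs : List (List Char)) (h : rs ≠ []) :
    rs.foldl pvTxtStep t0 =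
      pvJoinSp (((t0 :: rs).map PySem.Chars.strip).filter (fun p => !p.isEmpty)) := by
  cases rs with
  | nil => exact absurd rfl h
  | cons r rs' =>
    have hstep : pvTxtStep t0 r =
        pvJoinSp (pvPiece (PySem.Chars.strip t0) ++ pvPiece (PySem.Chars.strip r)) := by
      calc pvTxtStep t0 r = pvTxtStep (PySem.Chars.strip t0) r := by
            unfold pvTxtStep
            rw [pv_strip_eq_self (PySem.Chars.strip t0) (pv_clean_strip t0)]
        _ = _ := pvTxtStep_joinSp _ r (pv_clean_strip t0)
    rw [List.foldl_cons, hstep]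
    rw [pvKey rs' (pvPiece (PySem.Chars.strip t0) ++ pvPiece (PySem.Chars.strip r)) (by
      intro p hp
      rcases List.mem_append.mp hp with h | h
      · exact pvPiece_clean _ (pv_clean_strip t0) p h
      · exact pvPiece_clean _ (pv_clean_strip r) p h)]
    rw [List.map_cons, List.map_cons, pvFilter_cons, pvFilter_cons, List.append_assoc]

-- ===== bridging to the Dict level =====

def pvTextFoldStr (c : String) (rs : List pvTok) : String :=
  rs.foldl (fun c u => PySem.Str.strip (PySem.Str.join " "
    [PySem.Str.strip c, PySem.Str.strip (PySem.Dict.getD u "text" "")])) c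

theorem pvA1 (rs : List pvTok) : ∀ (t : pvTok), rs ≠ [] →
    rs.foldl pvMergeStep t = PySem.Dict.insert t "text" (pvTextFoldStr (PySem.Dict.getD t "text" "") rs) := by
  induction rs with
  | nil => intro t h; exact absurd rfl h
  | cons r rs ih =>
    intro t _
    cases rs with
    | nil => rfl
    | cons r2 rs' =>
      rw [List.foldl_cons, ih (pvMergeStep t r) (by simp)]
      simp only [pvMergeStep]
      rw [PySem.Dict.getD_insert_self, PySem.Dict.insert_insert_self]
      simp only [pvTextFoldStr, List.foldl_cons]

theorem pvBeqEmpty (s : String) : (s == "") = s.toList.isEmpty := by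
  by_cases h : s = ""
  · subst h; simp
  · have h1 : (s == "") = false := by simp [h]
    have h2 : s.toList ≠ [] := fun he => h (String.toList_inj.mp (by simp [he]))
    rw [h1]
    simp [h2]

theorem pvSpaceToList : (" " : String).toList = [' '] := by decide

theorem pvTextFold_toList (rs : List pvTok) : ∀ (c : String),
    (pvTextFoldStr c rs).toList =
      (rs.map (fun u => (PySem.Dict.getD u "text" "").toList)).foldl pvTxtStep c.toList := by
  induction rs with
  | nil => intro c; rfl
  | cons r rs ih =>
    intro c
    simp only [pvTextFoldStr] at ih ⊢
    have hc : (PySem.Str.strip (PySem.Str.join " "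
        [PySem.Str.strip c, PySem.Str.strip (PySem.Dict.getD r "text" "")])).toList =
        pvTxtStep c.toList ((PySem.Dict.getD r "text" "").toList) := by
      rw [PySem.Str.toList_strip, PySem.Str.toList_join, pvSpaceToList]
      simp only [pvTxtStep, List.map_cons, List.map_nil, PySem.Str.toList_strip]
    rw [List.map_cons, List.foldl_cons, List.foldl_cons, ih, hc]

theorem pvFilterStr (M : List String) :
    (M.filter (fun p => !(p == ""))).map String.toList =
      (M.map String.toList).filter (fun cs => !cs.isEmpty) := by
  have h1 : M.filter (fun p => !(p == "")) = M.filter (fun p => !(String.toList p).isEmpty) :=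
    List.filter_congr (by intro p _; rw [pvBeqEmpty])
  rw [h1,
    show (fun p : String => !(String.toList p).isEmpty) = ((fun cs => !cs.isEmpty) ∘ String.toList)
      from rfl,
    ← List.filter_map]

theorem pvRunFold (rs : List pvTok) (t : pvTok) (h : rs ≠ []) :
    rs.foldl pvMergeStep t = pvEmit t rs := by
  rw [pvA1 rs t h]
  have hstr : pvTextFoldStr (PySem.Dict.getD t "text" "") rs =
      PySem.Str.join " "
        (((t :: rs).map (fun u => PySem.Str.strip (PySem.Dict.getD u "text" ""))).filter
          (fun p => !(p == ""))) := by
    apply String.toList_inj.mp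
    rw [pvTextFold_toList, pvFoldTxt _ _ (by simp [h]),
        PySem.Str.toList_join, pvSpaceToList, pvFilterStr, ← pvJoinSp_eq_join]
    congr 1
    simp [List.map_map, Function.comp_def, PySem.Str.toList_strip]
  unfold pvEmit
  rw [if_neg (by simp [List.isEmpty_iff, h]), hstr]

theorem pvEmit_cons (p u : pvTok) (run : List pvTok) :
    pvEmit p (u :: run) = pvEmit (pvMergeStep p u) run := by
  cases run with
  | nil =>
    rw [← pvRunFold [u] p (by simp)]
    simp [pvEmit, List.foldl]
  | cons v run' =>
    rw [← pvRunFold (u :: v :: run') p (by simp),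
        ← pvRunFold (v :: run') (pvMergeStep p u) (by simp)]
    rfl

theorem pvLevel_mergeStep (p u : pvTok) :
    PySem.Dict.get? (pvMergeStep p u) "level" = PySem.Dict.get? p "level" := by
  unfold pvMergeStep
  exact PySem.Dict.get?_insert_of_ne _ _ (by decide)

def pvFinish (st : List pvTok × Option pvTok) : List pvTok :=
  match st.2 with
  | some p => st.1 ++ [p]
  | none => st.1

theorem pvMain : ∀ (n : Nat) (l : List pvTok), l.length ≤ n →
    (∀ m, pvFinish (l.foldl pvAStep (m, none)) = m ++ pvBGo l) ∧
    (∀ m p, pvFinish (l.foldl pvAStep (m, some p)) =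
       m ++ pvEmit p (l.takeWhile (pvSameRun (PySem.Dict.get? p "level")))
         :: pvBGo (l.dropWhile (pvSameRun (PySem.Dict.get? p "level")))) := by
  intro n
  induction n with
  | zero =>
    intro l hl
    have : l = [] := List.length_eq_zero_iff.mp (Nat.le_zero.mp hl)
    subst this
    exact ⟨fun m => by simp [pvFinish, pvBGo], fun m p => by simp [pvFinish, pvBGo, pvEmit]⟩
  | succ n ih =>
    intro l hl
    cases l with
    | nil => exact ⟨fun m => by simp [pvFinish, pvBGo], fun m p => by simp [pvFinish, pvBGo, pvEmit]⟩
    | cons t rest =>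
      have hrest : rest.length ≤ n := by simpa using hl
      constructor
      · intro m
        rw [List.foldl_cons]
        cases hh : (PySem.Dict.get? t "type" == some "heading") with
        | true =>
          rw [show pvAStep (m, none) t = (m, some t) from by simp [pvAStep, hh]]
          rw [(ih rest hrest).2 m t]
          rw [pvBGo]
          rw [if_pos (show pvIsHead t = true from hh)]
        | false =>
          rw [show pvAStep (m, none) t = (m ++ [t], none) from by simp [pvAStep, hh]]
          rw [(ih rest hrest).1 (m ++ [t])]
          rw [pvBGo]
          rw [if_neg (by simp [pvIsHead, hh])]
          simp
      · intro m p
        rw [List.foldl_cons]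
        cases hs : pvSameRun (PySem.Dict.get? p "level") t with
        | true =>
          obtain ⟨hh, heq⟩ : pvIsHead t = true ∧
              (PySem.Dict.get? t "level" == PySem.Dict.get? p "level") = true := by
            simpa [pvSameRun, -beq_iff_eq] using hs
          have heq2 : (PySem.Dict.get? p "level" == PySem.Dict.get? t "level") = true := by
            simp only [beq_iff_eq] at heq ⊢; exact heq.symm
          rw [show pvAStep (m, some p) t = (m, some (pvMergeStep p t)) from by
            simp [pvAStep, show (PySem.Dict.get? t "type" == some "heading") = true from hh, heq2]]
          rw [(ih rest hrest).2 m (pvMergeStep p t)]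
          rw [pvLevel_mergeStep]
          rw [List.takeWhile_cons, List.dropWhile_cons, if_pos hs, if_pos hs]
          rw [pvEmit_cons]
        | false =>
          rw [List.takeWhile_cons, List.dropWhile_cons, if_neg (by simp [hs]), if_neg (by simp [hs])]
          rw [show pvEmit p [] = p from by simp [pvEmit]]
          cases hh : (PySem.Dict.get? t "type" == some "heading") with
          | true =>
            have heq : (PySem.Dict.get? p "level" == PySem.Dict.get? t "level") = false := by
              have h2 : (PySem.Dict.get? t "level" == PySem.Dict.get? p "level") = false := by
                simpa [pvSameRun, show pvIsHead t = true from hh, -beq_iff_eq] using hs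
              simp only [beq_eq_false_iff_ne, ne_eq] at h2 ⊢
              exact fun e => h2 e.symm
            rw [show pvAStep (m, some p) t = (m ++ [p], some t) from by
              simp [pvAStep, hh, heq]]
            rw [(ih rest hrest).2 (m ++ [p]) t]
            rw [pvBGo]
            rw [if_pos (show pvIsHead t = true from hh)]
            simp
          | false =>
            rw [show pvAStep (m, some p) t = (m ++ [p] ++ [t], none) from by
              simp [pvAStep, hh]]
            rw [(ih rest hrest).1 (m ++ [p] ++ [t])]
            rw [pvBGo]
            rw [if_neg (by simp [pvIsHead, hh])]
            simp

-- ===== VERDICT (by name: the statement is the Claim_ definition above) =====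
theorem merge_consecutive_headings_py_spec : Claim_equal_merge_consecutive_headings_py := by
  intro tokens _
  unfold Spec_merge_consecutive_headings_py
  show (pvFinish ((tokens.map (fun t => PySem.Dict.ofList t)).foldl pvAStep ([], none))).map
      (fun d => PySem.Dict.items d) = merge_consecutive_headings_py_alt tokens
  rw [(pvMain (tokens.map (fun t => PySem.Dict.ofList t)).length _ le_rfl).1 []]
  rfl
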